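-- pv_equiv track=rewrite | github.com/hurakot/web-apps | Лаб_работа_3/app/app.py | elite
-- ===== SOURCE A (Python) =====
-- def elite(phone):
--     alphabet=["0", "1", "2", "3", "4", "5", "6", "7", "8", "9"] #Алфавит цифр
--     dopalphabet=[" ", "(", ")", "-", ".", "+"] #Дополнительный алфавит с знаками
--     alpha = [] #C len это кол-во символов из алфавита цифр
--     dop = [] #С len это кол-во символов из дополнительного алфавита
--     for i in phone:
--         if i in alphabet:
--             alpha.append(i)
--         elif i in dopalphabet:
--             dop.append(i)
--         else:
--             return 1
--     if len(alpha) == 10: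
--         return 0
--     elif len(alpha) == 11:
--         if alpha[0] == "8" or (dop and dop[0] == "+" and alpha[0] == "7"):
--             return 0
--         else:
--             return 2
--     else:
--         return 2
-- ===== SOURCE B (Python) =====
-- DIGITS = "0123456789"
-- _DEL_SEPS = str.maketrans("", "", " ()-.+")
--
-- def elite(phone):
--     digits = phone.translate(_DEL_SEPS)      # phone with all separator characters deleted
--     if digits.strip(DIGITS):                 # anything left after stripping digits => invalid char
--         return 1
--     if len(digits) == 10:
--         return 0
--     if len(digits) != 11:
--         return 2
--     if digits[0] == "8":
--         return 0
--     # first non-digit char of a valid phone is its first separator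
--     return 0 if digits[0] == "7" and phone.lstrip(DIGITS)[:1] == "+" else 2
-- ===== Notes on version B (the rewrite author's own statement) =====
-- stated objective: simpler
-- what changed: Replaces A's stateful character loop that grows two lists and early-returns by a loop-free string pipeline: translate deletes the separators, strip(DIGITS) validates, and a flat guard-clause ladder classifies, using lstrip(DIGITS) to read off the first separator.
import Mathlib
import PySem

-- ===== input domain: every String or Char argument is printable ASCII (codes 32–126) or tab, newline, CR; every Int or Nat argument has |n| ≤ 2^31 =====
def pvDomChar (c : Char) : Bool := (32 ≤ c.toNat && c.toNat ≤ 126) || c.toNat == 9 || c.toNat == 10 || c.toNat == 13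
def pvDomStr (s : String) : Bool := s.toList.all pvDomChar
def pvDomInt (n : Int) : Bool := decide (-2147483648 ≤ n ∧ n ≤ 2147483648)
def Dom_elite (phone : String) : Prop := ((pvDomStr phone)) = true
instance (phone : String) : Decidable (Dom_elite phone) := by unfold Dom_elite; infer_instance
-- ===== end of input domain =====

-- B replaces A's stateful character loop (two growing lists + early return) by a loop-free
-- string pipeline: delete separators, validate by stripping digits, then a guard-clause
-- ladder using lstrip to find the first separator; objective: simpler.

-- ===== PORT A =====
-- membership in A's alphabet / dopalphabet lists
def eliteIsDig (c : Char) : Bool :=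
  c ∈ ['0', '1', '2', '3', '4', '5', '6', '7', '8', '9']

def eliteIsSep (c : Char) : Bool :=
  c ∈ [' ', '(', ')', '-', '.', '+']

-- the return cascade after A's loop finishes (alpha[0]/dop[0] accesses as head; both guarded nonempty)
def eliteClassify (alpha dop : List Char) : Int :=
  if alpha.length = 10 then 0
  else if alpha.length = 11 then
    if alpha.headD ' ' = '8' ∨ (dop ≠ [] ∧ dop.headD ' ' = '+' ∧ alpha.headD ' ' = '7')
    then 0 else 2
  else 2

-- A's loop: appends to alpha / dop, early-returns 1 on any other character
def eliteLoop (cs : List Char) (alpha dop : List Char) : Int :=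
  match cs with
  | [] => eliteClassify alpha dop
  | c :: rest =>
    if eliteIsDig c then eliteLoop rest (alpha ++ [c]) dop
    else if eliteIsSep c then eliteLoop rest alpha (dop ++ [c])
    else 1

def elite (phone : String) : Int := eliteLoop phone.toList [] []

-- ===== PORT B =====
-- Source B's string operations over List Char:
-- phone.translate(_DEL_SEPS)  = delete every separator character
-- s.strip(DIGITS)             = drop digit chars from both ends
-- s.lstrip(DIGITS)[:1] == "+" = head of dropWhile-digits is '+'
-- digits[0] == c              = head? = some c (guarded: length = 11)
def elite_alt (phone : String) : Int :=
  let digits := phone.toList.filter (fun c => !eliteIsSep c)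
  if ((digits.dropWhile eliteIsDig).reverse.dropWhile eliteIsDig).reverse ≠ [] then 1
  else if digits.length = 10 then 0
  else if digits.length ≠ 11 then 2
  else if digits.head? = some '8' then 0
  else if digits.head? = some '7' ∧ (phone.toList.dropWhile eliteIsDig).head? = some '+'
  then 0 else 2

-- ===== PRECONDITION & SPEC =====
def Spec_elite (phone : String) (out : Int) : Prop := out = elite_alt phone
instance (phone : String) (out : Int) : Decidable (Spec_elite phone out) := by unfold Spec_elite; infer_instance

-- ===== CLAIM (what is proved, stated in full; the proofs are below) =====
def Claim_equal_elite : Prop := ∀ (phone : String), Dom_elite phone → Spec_elite phone (elite phone)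

-- ===== LEMMAS AND PROOFS =====

theorem eliteDig_not_sep {c : Char} (h : eliteIsDig c = true) : eliteIsSep c = false := by
  revert h; simp [eliteIsDig, eliteIsSep]
  rintro (h|h|h|h|h|h|h|h|h|h) <;> simp [h]

-- A's loop unrolled to a closed description
theorem eliteLoop_eq (cs : List Char) : ∀ (alpha dop : List Char),
    eliteLoop cs alpha dop =
      if cs.all (fun c => eliteIsDig c || eliteIsSep c) then
        eliteClassify (alpha ++ cs.filter eliteIsDig) (dop ++ cs.filter eliteIsSep)
      else 1 := by
  induction cs with
  | nil => intro alpha dop; simp [eliteLoop]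
  | cons c rest ih =>
    intro alpha dop
    by_cases hd : eliteIsDig c
    · simp [eliteLoop, hd, eliteDig_not_sep hd, ih, List.append_assoc]
    · by_cases hs : eliteIsSep c
      · simp [eliteLoop, hd, hs, ih, List.append_assoc]
      · simp [eliteLoop, hd, hs]

-- the strip-based validity test: empty after stripping digits from both ends ↔ all digits
theorem strip_nil_iff (p : Char → Bool) (l : List Char) :
    ((l.dropWhile p).reverse.dropWhile p).reverse = [] ↔ ∀ x ∈ l, p x = true := by
  rw [List.reverse_eq_nil_iff, List.dropWhile_eq_nil_iff]
  constructor
  · intro h x hx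
    rcases (by rw [List.takeWhile_append_dropWhile]; exact hx :
        x ∈ l.takeWhile p ++ l.dropWhile p) |> List.mem_append.1 with h1 | h2
    · exact List.mem_takeWhile_imp h1
    · exact h x (by simpa using h2)
  · intro h x hx
    exact h x (List.dropWhile_sublist p |>.mem (by simpa using hx))

theorem valid_filter_eq (cs : List Char)
    (hv : cs.all (fun c => eliteIsDig c || eliteIsSep c) = true) :
    cs.filter (fun c => !eliteIsSep c) = cs.filter eliteIsDig := by
  apply List.filter_congr
  intro x hx
  have := (List.all_eq_true.1 hv) x hx
  rcases Bool.or_eq_true_iff.1 this with h | h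
  · simp [h, eliteDig_not_sep h]
  · have hd : eliteIsDig x = false := by
      cases hdx : eliteIsDig x
      · rfl
      · rw [eliteDig_not_sep hdx] at h; exact absurd h (by simp)
    simp [h, hd]

-- first non-digit of a valid string is its first separator
theorem dropWhile_head_eq_filter_head (cs : List Char)
    (hv : cs.all (fun c => eliteIsDig c || eliteIsSep c) = true) :
    (cs.dropWhile eliteIsDig).head? = (cs.filter eliteIsSep).head? := by
  induction cs with
  | nil => rfl
  | cons c rest ih =>
    simp only [List.all_cons, Bool.and_eq_true] at hv
    by_cases hd : eliteIsDig c
    · rw [List.dropWhile_cons_of_pos hd,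
        List.filter_cons_of_neg (by simp [eliteDig_not_sep hd]), ih hv.2]
    · have hs : eliteIsSep c = true := by
        rcases Bool.or_eq_true_iff.1 hv.1 with h | h
        · exact absurd h hd
        · exact h
      rw [List.dropWhile_cons_of_neg (by simp [hd]), List.filter_cons_of_pos hs]
      rfl

-- ===== VERDICT (by name: the statement is the Claim_ definition above) =====
theorem elite_spec : Claim_equal_elite := by
  intro phone _
  unfold Spec_elite elite elite_alt
  rw [eliteLoop_eq]
  by_cases hv : phone.toList.all (fun c => eliteIsDig c || eliteIsSep c) = true
  · rw [if_pos hv]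
    have hfil := valid_filter_eq phone.toList hv
    have hstrip : (((phone.toList.filter (fun c => !eliteIsSep c)).dropWhile
        eliteIsDig).reverse.dropWhile eliteIsDig).reverse = [] := by
      rw [strip_nil_iff, hfil]
      intro x hx
      exact (List.mem_filter.1 hx).2
    simp only [List.nil_append]
    rw [if_neg (not_not_intro hstrip), hfil,
      dropWhile_head_eq_filter_head phone.toList hv]
    generalize List.filter eliteIsDig phone.toList = digits
    generalize List.filter eliteIsSep phone.toList = seps
    unfold eliteClassify
    by_cases h10 : digits.length = 10
    · rw [if_pos h10, if_pos h10]
    · rw [if_neg h10, if_neg h10]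
      by_cases h11 : digits.length = 11
      · rw [if_pos h11, if_neg (not_not_intro h11)]
        cases digits with
        | nil => simp at h11
        | cons d ds =>
          cases seps with
          | nil => by_cases h8 : d = '8' <;> simp [h8]
          | cons s ss =>
            by_cases h8 : d = '8'
            · simp [h8]
            · by_cases h7 : d = '7' <;> by_cases hp : s = '+' <;> simp [h8, h7, hp]
      · rw [if_neg h11, if_pos h11]
  · simp only [Bool.not_eq_true] at hv
    rw [if_neg (by simp [hv])]
    have hx : ∃ x ∈ phone.toList, eliteIsDig x = false ∧ eliteIsSep x = false := by
      rcases List.all_eq_false.1 hv with ⟨x, hx, hxf⟩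
      exact ⟨x, hx, by simpa [Bool.or_eq_false_iff] using hxf⟩
    obtain ⟨x, hx, hxd, hxs⟩ := hx
    rw [if_pos]
    intro hcon
    rw [strip_nil_iff] at hcon
    exact absurd (hcon x (List.mem_filter.2 ⟨hx, by simp [hxs]⟩)) (by simp [hxd])
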